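-- pv_equiv track=rewrite | github.com/ssongjj/studycodingtest | 프로그래머스/2/340211. ［PCCP 기출문제］ 3번 ／ 충돌위험 찾기/［PCCP 기출문제］ 3번 ／ 충돌위험 찾기.py | move_points
-- ===== SOURCE A (Python) =====
-- def move_points(points, route):
--     path = []
--     idx = 0
--
--     for i in range(len(route) - 1):
--         r1, c1 = points[route[i] - 1]
--         r2, c2 = points[route[i + 1] - 1]
--
--         while r1 != r2:
--             path.append((r1, c1, idx))
--             if r1 < r2:
--                 r1 += 1
--             else:
--                 r1 -= 1
--             idx += 1
--
--
--         while c1 != c2: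
--             path.append((r1, c1, idx))
--             if c1 < c2:
--                 c1 += 1
--             else:
--                 c1 -= 1
--             idx += 1
--
--     path.append((r1, c1, idx))
--     return path
-- ===== SOURCE B (Python) =====
-- def move_points(points, route):
--     # Prefix-sum / closed-form approach: compute the waypoint list and the
--     # cumulative arrival times (Manhattan prefix sums), then answer each
--     # timestamp t by locating its segment and computing the cell arithmetically.
--     ws = [points[r - 1] for r in route]
--     starts = [0]
--     for (r1, c1), (r2, c2) in zip(ws, ws[1:]):
--         starts.append(starts[-1] + abs(r2 - r1) + abs(c2 - c1))
--     total = starts[-1]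
--     segs = list(zip(zip(starts, ws), zip(starts[1:], ws[1:])))
--
--     def pos(t):
--         for (s, (r1, c1)), (s2, (r2, c2)) in segs:
--             if t < s2:
--                 d = t - s
--                 dr = abs(r2 - r1)
--                 if d < dr:
--                     return (r1 + (1 if r1 < r2 else -1) * d, c1)
--                 return (r2, c1 + (1 if c1 < c2 else -1) * (d - dr))
--         return ws[-1]
--
--     return [(*pos(t), t) for t in range(total + 1)]
-- ===== Notes on version B (the rewrite author's own statement) =====
-- stated objective: alternative
-- what changed: B replaces A's cell-by-cell walk (while-loops stepping one cell at a time, threading a path list and an idx counter) with an arithmetic algorithm: it precomputes the Manhattan-distance prefix sums of the waypoints, then answers every timestamp t independently by locating t's segment among the prefix sums and computing the cell with a closed-form offset formula; Pre_ excludes routes shorter than 2 entries (A raises UnboundLocalError) and route entries indexing outside points (IndexError).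
import Mathlib
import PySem

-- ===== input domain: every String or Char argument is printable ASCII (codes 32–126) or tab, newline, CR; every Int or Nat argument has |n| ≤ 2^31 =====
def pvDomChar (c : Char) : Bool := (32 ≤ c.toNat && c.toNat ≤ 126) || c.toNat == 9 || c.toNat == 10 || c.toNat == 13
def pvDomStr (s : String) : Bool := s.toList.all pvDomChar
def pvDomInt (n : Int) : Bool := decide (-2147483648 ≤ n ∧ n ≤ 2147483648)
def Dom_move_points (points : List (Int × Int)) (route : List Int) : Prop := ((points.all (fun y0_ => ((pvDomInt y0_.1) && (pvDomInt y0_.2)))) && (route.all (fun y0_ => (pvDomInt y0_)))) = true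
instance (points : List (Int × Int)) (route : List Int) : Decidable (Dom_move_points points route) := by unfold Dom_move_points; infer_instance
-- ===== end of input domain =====

-- B replaces A's cell-by-cell simulation with Manhattan prefix sums over the waypoints
-- plus a closed-form position query per timestamp (alternative algorithm, same result).


-- ===== PORT A =====
-- `while r1 != r2: path.append((r1, c1, idx)); r1 ± 1; idx += 1`  — returns (path, r1, idx)
def pvWalkRow (r1 r2 c1 : Int) (path : List (Int × Int × Int)) (idx : Int) :
    List (Int × Int × Int) × Int × Int :=
  if r1 = r2 then (path, r1, idx)
  else if r1 < r2 then pvWalkRow (r1 + 1) r2 c1 (path ++ [(r1, c1, idx)]) (idx + 1)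
  else pvWalkRow (r1 - 1) r2 c1 (path ++ [(r1, c1, idx)]) (idx + 1)
termination_by (r2 - r1).natAbs
decreasing_by all_goals omega

-- `while c1 != c2: path.append((r1, c1, idx)); c1 ± 1; idx += 1`  — returns (path, c1, idx)
def pvWalkCol (c1 c2 r1 : Int) (path : List (Int × Int × Int)) (idx : Int) :
    List (Int × Int × Int) × Int × Int :=
  if c1 = c2 then (path, c1, idx)
  else if c1 < c2 then pvWalkCol (c1 + 1) c2 r1 (path ++ [(r1, c1, idx)]) (idx + 1)
  else pvWalkCol (c1 - 1) c2 r1 (path ++ [(r1, c1, idx)]) (idx + 1)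
termination_by (c2 - c1).natAbs
decreasing_by all_goals omega

-- one iteration of `for i in range(len(route) - 1)`; state = (path, idx, r1, c1)
def pvStepA (points : List (Int × Int)) (route : List Int)
    (st : List (Int × Int × Int) × Int × Int × Int) (i : Int) :
    List (Int × Int × Int) × Int × Int × Int :=
  let p1 := PySem.List.pyGetD points (PySem.List.pyGetD route i 0 - 1) (0, 0)
  let p2 := PySem.List.pyGetD points (PySem.List.pyGetD route (i + 1) 0 - 1) (0, 0)
  let w1 := pvWalkRow p1.1 p2.1 p1.2 st.1 st.2.1
  let w2 := pvWalkCol p1.2 p2.2 w1.2.1 w1.1 w1.2.2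
  (w2.1, w2.2.2, w1.2.1, w2.2.1)

def move_points (points : List (Int × Int)) (route : List Int) : List (Int × Int × Int) :=
  let st := (PySem.List.pyRange 0 ((route.length : Int) - 1) 1).foldl
    (pvStepA points route) ([], 0, 0, 0)
  st.1 ++ [(st.2.2.1, st.2.2.2, st.2.1)]

-- ===== PORT B =====
-- `def pos(t): for (s, (r1, c1)), (s2, (r2, c2)) in segs: …` — the per-timestamp query
def pvPos (segs : List ((Int × Int × Int) × (Int × Int × Int))) (wlast : Int × Int) (t : Int) :
    Int × Int :=
  match segs with
  | [] => wlast
  | ((s, r1, c1), (s2, r2, c2)) :: rest =>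
    if t < s2 then
      let d := t - s
      let dr : Int := ((r2 - r1).natAbs : Int)
      if d < dr then (r1 + (if r1 < r2 then 1 else -1) * d, c1)
      else (r2, c1 + (if c1 < c2 then 1 else -1) * (d - dr))
    else pvPos rest wlast t

def move_points_alt (points : List (Int × Int)) (route : List Int) : List (Int × Int × Int) :=
  let ws := route.map (fun r => PySem.List.pyGetD points (r - 1) (0, 0))
  let starts := (ws.zip ws.tail).foldl
    (fun acc p => acc ++ [PySem.List.pyGetD acc (-1) 0
      + ((p.2.1 - p.1.1).natAbs : Int) + ((p.2.2 - p.1.2).natAbs : Int)]) [0]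
  let total := PySem.List.pyGetD starts (-1) 0
  let segs := (starts.zip ws).zip (starts.tail.zip ws.tail)
  (PySem.List.pyRange 0 (total + 1) 1).map
    (fun t => ((pvPos segs (PySem.List.pyGetD ws (-1) (0, 0)) t).1,
               (pvPos segs (PySem.List.pyGetD ws (-1) (0, 0)) t).2, t))

-- ===== PRECONDITION & SPEC =====
-- A raises UnboundLocalError when route has fewer than two entries, and IndexError when a
-- route entry (minus one, with Python's negative wraparound) indexes outside points.
def Pre_move_points (points : List (Int × Int)) (route : List Int) : Prop :=
  2 ≤ route.length ∧ ∀ e ∈ route, PySem.Raise.InRange points.length (e - 1)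
instance (points : List (Int × Int)) (route : List Int) : Decidable (Pre_move_points points route) := by unfold Pre_move_points; infer_instance
def pvWitness_move_points : (List (Int × Int)) × List Int := ([(1, 2), (3, 4)], [1, 2, 1])

def Spec_move_points (points : List (Int × Int)) (route : List Int) (out : List (Int × Int × Int)) : Prop := out = move_points_alt points route
instance (points : List (Int × Int)) (route : List Int) (out : List (Int × Int × Int)) : Decidable (Spec_move_points points route out) := by unfold Spec_move_points; infer_instance

-- ===== CLAIM (what is proved, stated in full; the proofs are below) =====
def Claim_equal_move_points : Prop := ∀ (points : List (Int × Int)) (route : List Int), Dom_move_points points route → Pre_move_points points route → Spec_move_points points route (move_points points route)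

-- ===== LEMMAS AND PROOFS =====

def pvStamp : Int → List (Int × Int) → List (Int × Int × Int)
  | _, [] => []
  | k, p :: t => (p.1, p.2, k) :: pvStamp (k + 1) t

theorem pvStamp_append (l1 l2 : List (Int × Int)) (k : Int) :
    pvStamp k (l1 ++ l2) = pvStamp k l1 ++ pvStamp (k + l1.length) l2 := by
  induction l1 generalizing k with
  | nil => simp [pvStamp]
  | cons p t ih => simp [pvStamp, ih (k + 1)]; ring_nf

def pvRowCells (r1 r2 c1 : Int) : List (Int × Int) :=
  (PySem.List.pyRange r1 r2 (if r1 < r2 then 1 else -1)).map (fun r => (r, c1))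
def pvColCells (c1 c2 r : Int) : List (Int × Int) :=
  (PySem.List.pyRange c1 c2 (if c1 < c2 then 1 else -1)).map (fun c => (r, c))
def pvCells (w1 w2 : Int × Int) : List (Int × Int) :=
  pvRowCells w1.1 w2.1 w1.2 ++ pvColCells w1.2 w2.2 w2.1

theorem pvRowCells_nil (r c1 : Int) : pvRowCells r r c1 = [] := by
  simp [pvRowCells, PySem.List.pyRange_neg_one_eq_nil le_rfl]

theorem pvRange_step_up {r1 r2 : Int} (h : r1 < r2) :
    PySem.List.pyRange (r1 + 1) r2 (if r1 + 1 < r2 then 1 else -1) = PySem.List.pyRange (r1 + 1) r2 1 := by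
  split_ifs with h2
  · rfl
  · rw [PySem.List.pyRange_neg_one_eq_nil (by omega), PySem.List.pyRange_one_eq_nil (by omega)]

theorem pvRange_step_down {r1 r2 : Int} (h : r2 < r1) :
    PySem.List.pyRange (r1 - 1) r2 (if r1 - 1 < r2 then 1 else -1) = PySem.List.pyRange (r1 - 1) r2 (-1) := by
  split_ifs with h2
  · rw [PySem.List.pyRange_neg_one_eq_nil (by omega), PySem.List.pyRange_one_eq_nil (by omega)]
  · rfl

theorem pvRowCells_cons_up {r1 r2 : Int} (c1 : Int) (h : r1 < r2) :
    pvRowCells r1 r2 c1 = (r1, c1) :: pvRowCells (r1 + 1) r2 c1 := by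
  unfold pvRowCells
  rw [pvRange_step_up h, if_pos h, PySem.List.pyRange_one_cons h, List.map_cons]

theorem pvRowCells_cons_down {r1 r2 : Int} (c1 : Int) (h : r2 < r1) :
    pvRowCells r1 r2 c1 = (r1, c1) :: pvRowCells (r1 - 1) r2 c1 := by
  unfold pvRowCells
  rw [pvRange_step_down h, if_neg (by omega), PySem.List.pyRange_neg_one_cons h, List.map_cons]

theorem pvColCells_nil (c r : Int) : pvColCells c c r = [] := by
  simp [pvColCells, PySem.List.pyRange_neg_one_eq_nil le_rfl]

theorem pvColCells_cons_up {c1 c2 : Int} (r : Int) (h : c1 < c2) :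
    pvColCells c1 c2 r = (r, c1) :: pvColCells (c1 + 1) c2 r := by
  unfold pvColCells
  rw [pvRange_step_up h, if_pos h, PySem.List.pyRange_one_cons h, List.map_cons]

theorem pvColCells_cons_down {c1 c2 : Int} (r : Int) (h : c2 < c1) :
    pvColCells c1 c2 r = (r, c1) :: pvColCells (c1 - 1) c2 r := by
  unfold pvColCells
  rw [pvRange_step_down h, if_neg (by omega), PySem.List.pyRange_neg_one_cons h, List.map_cons]

theorem pvRowCells_length (r1 r2 c1 : Int) : (pvRowCells r1 r2 c1).length = (r2 - r1).natAbs := by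
  by_cases h : r1 < r2
  · simp [pvRowCells, if_pos h, PySem.List.length_pyRange_one]; omega
  · simp [pvRowCells, if_neg h, PySem.List.length_pyRange_neg_one]; omega

theorem pvColCells_length (c1 c2 r : Int) : (pvColCells c1 c2 r).length = (c2 - c1).natAbs := by
  by_cases h : c1 < c2
  · simp [pvColCells, if_pos h, PySem.List.length_pyRange_one]; omega
  · simp [pvColCells, if_neg h, PySem.List.length_pyRange_neg_one]; omega

theorem pvWalkRow_spec (r1 r2 c1 : Int) (path : List (Int × Int × Int)) (idx : Int) :
    pvWalkRow r1 r2 c1 path idx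
      = (path ++ pvStamp idx (pvRowCells r1 r2 c1), r2, idx + (pvRowCells r1 r2 c1).length) := by
  fun_induction pvWalkRow r1 r2 c1 path idx with
  | case1 path idx =>
    simp [pvRowCells_nil, pvStamp]
  | case2 r1 path idx h hlt ih =>
    rw [ih, pvRowCells_cons_up c1 hlt]
    simp only [pvStamp, List.append_assoc, List.singleton_append, List.length_cons, Prod.mk.injEq]
    exact ⟨trivial, trivial, by push_cast; ring⟩
  | case3 r1 path idx h hlt ih =>
    rw [ih, pvRowCells_cons_down (r1 := r1) (r2 := r2) c1 (by omega)]
    simp only [pvStamp, List.append_assoc, List.singleton_append, List.length_cons, Prod.mk.injEq]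
    exact ⟨trivial, trivial, by push_cast; ring⟩

theorem pvWalkCol_spec (c1 c2 r : Int) (path : List (Int × Int × Int)) (idx : Int) :
    pvWalkCol c1 c2 r path idx
      = (path ++ pvStamp idx (pvColCells c1 c2 r), c2, idx + (pvColCells c1 c2 r).length) := by
  fun_induction pvWalkCol c1 c2 r path idx with
  | case1 path idx =>
    simp [pvColCells_nil, pvStamp]
  | case2 c1 path idx h hlt ih =>
    rw [ih, pvColCells_cons_up r hlt]
    simp only [pvStamp, List.append_assoc, List.singleton_append, List.length_cons, Prod.mk.injEq]
    exact ⟨trivial, trivial, by push_cast; ring⟩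
  | case3 c1 path idx h hlt ih =>
    rw [ih, pvColCells_cons_down (c1 := c1) (c2 := c2) r (by omega)]
    simp only [pvStamp, List.append_assoc, List.singleton_append, List.length_cons, Prod.mk.injEq]
    exact ⟨trivial, trivial, by push_cast; ring⟩

-- pvStepA with the two route lookups abstracted out
def pvF (points : List (Int × Int)) (st : List (Int × Int × Int) × Int × Int × Int) (a b : Int) :
    List (Int × Int × Int) × Int × Int × Int :=
  let p1 := PySem.List.pyGetD points (a - 1) (0, 0)
  let p2 := PySem.List.pyGetD points (b - 1) (0, 0)
  let w1 := pvWalkRow p1.1 p2.1 p1.2 st.1 st.2.1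
  let w2 := pvWalkCol p1.2 p2.2 w1.2.1 w1.1 w1.2.2
  (w2.1, w2.2.2, w1.2.1, w2.2.1)

theorem pvF_spec (points : List (Int × Int)) (path : List (Int × Int × Int)) (idx : Int)
    (rc : Int × Int) (a b : Int) :
    pvF points (path, idx, rc) a b
      = (path ++ pvStamp idx (pvCells (PySem.List.pyGetD points (a - 1) (0, 0)) (PySem.List.pyGetD points (b - 1) (0, 0))),
         idx + (pvCells (PySem.List.pyGetD points (a - 1) (0, 0)) (PySem.List.pyGetD points (b - 1) (0, 0))).length,
         PySem.List.pyGetD points (b - 1) (0, 0)) := by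
  simp only [pvF, pvCells, pvWalkRow_spec, pvWalkCol_spec,
    pvStamp_append, List.append_assoc, List.length_append, Prod.mk.injEq]
  exact ⟨trivial, by push_cast [List.length_append]; ring, trivial⟩

theorem pvIdxFoldNat {α : Type} (f : α → Int → Int → α) (d : Int) :
    ∀ (t : List Int) (x : Int) (init : α),
      (List.range t.length).foldl
          (fun st (k : Nat) => f st (PySem.List.pyGetD (x :: t) (k : Int) d)
            (PySem.List.pyGetD (x :: t) ((k : Int) + 1) d)) init
        = ((x :: t).zip t).foldl (fun st p => f st p.1 p.2) init := by
  intro t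
  induction t with
  | nil => intro x init; simp
  | cons y t' ih =>
    intro x init
    rw [List.length_cons, List.range_succ_eq_map, List.foldl_cons, List.foldl_map]
    have h0 : PySem.List.pyGetD (x :: y :: t') ((0 : Nat) : Int) d = x := by simp
    have h1 : PySem.List.pyGetD (x :: y :: t') (((0 : Nat) : Int) + 1) d = y := by
      rw [show ((0 : Nat) : Int) + 1 = ((1 : Nat) : Int) by norm_num,
         PySem.List.pyGetD_natCast]
      simp [List.getD]
    rw [h0, h1]
    have hfun : (fun (st : α) (k : Nat) => f st (PySem.List.pyGetD (x :: y :: t') ((k.succ : Nat) : Int) d)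
        (PySem.List.pyGetD (x :: y :: t') (((k.succ : Nat) : Int) + 1) d))
        = (fun (st : α) (k : Nat) => f st (PySem.List.pyGetD (y :: t') ((k : Nat) : Int) d)
        (PySem.List.pyGetD (y :: t') (((k : Nat) : Int) + 1) d)) := by
      funext st k
      have e1 : PySem.List.pyGetD (x :: y :: t') ((k.succ : Nat) : Int) d
          = PySem.List.pyGetD (y :: t') ((k : Nat) : Int) d := by
        rw [PySem.List.pyGetD_natCast, PySem.List.pyGetD_natCast]
        simp [List.getD]
      have e2 : PySem.List.pyGetD (x :: y :: t') (((k.succ : Nat) : Int) + 1) d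
          = PySem.List.pyGetD (y :: t') (((k : Nat) : Int) + 1) d := by
        rw [show ((k.succ : Nat) : Int) + 1 = ((k.succ.succ : Nat) : Int) by push_cast; ring,
            show ((k : Nat) : Int) + 1 = ((k.succ : Nat) : Int) by push_cast; ring,
            PySem.List.pyGetD_natCast, PySem.List.pyGetD_natCast]
        simp [List.getD]
      rw [e1, e2]
    rw [hfun, ih y (f init x y), List.zip_cons_cons, List.foldl_cons]

theorem pvIdxFold {α : Type} (f : α → Int → Int → α) (d : Int) (l : List Int) (init : α) :
    (PySem.List.pyRange 0 ((l.length : Int) - 1) 1).foldl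
        (fun st i => f st (PySem.List.pyGetD l i d) (PySem.List.pyGetD l (i + 1) d)) init
      = (l.zip l.tail).foldl (fun st p => f st p.1 p.2) init := by
  cases l with
  | nil => rw [PySem.List.pyRange_one_eq_nil (by norm_num)]; simp
  | cons x t =>
    rw [show ((x :: t).length : Int) - 1 = ((t.length : Nat) : Int) by push_cast [List.length_cons]; ring,
        PySem.List.pyRange_zero_natCast, List.foldl_map]
    exact pvIdxFoldNat f d t x init

theorem pvFoldPairs (points : List (Int × Int)) :
    ∀ (pairs : List (Int × Int)) (path : List (Int × Int × Int)) (idx : Int) (rc : Int × Int),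
      pairs.foldl (fun st p => pvF points st p.1 p.2) (path, idx, rc)
        = (path ++ pvStamp idx (pairs.flatMap (fun p => pvCells (PySem.List.pyGetD points (p.1 - 1) (0, 0)) (PySem.List.pyGetD points (p.2 - 1) (0, 0)))),
           idx + (pairs.flatMap (fun p => pvCells (PySem.List.pyGetD points (p.1 - 1) (0, 0)) (PySem.List.pyGetD points (p.2 - 1) (0, 0)))).length,
           pairs.foldl (fun _ p => PySem.List.pyGetD points (p.2 - 1) (0, 0)) rc) := by
  intro pairs
  induction pairs with
  | nil => intro path idx rc; simp [pvStamp]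
  | cons p t ih =>
    intro path idx rc
    rw [List.foldl_cons, pvF_spec, ih, List.flatMap_cons, pvStamp_append, List.foldl_cons]
    simp only [List.append_assoc, List.length_append, Prod.mk.injEq]
    exact ⟨trivial, by push_cast; ring, trivial⟩

theorem pvZipFoldLastSnd {α : Type} (g : Int → α) :
    ∀ (t : List Int) (x y : Int) (init : α),
      ((x :: y :: t).zip (y :: t)).foldl (fun _ p => g p.2) init
        = g ((y :: t).getLast (by simp)) := by
  intro t
  induction t with
  | nil => intro x y init; simp
  | cons z t' ih =>
    intro x y init
    rw [List.zip_cons_cons, List.foldl_cons]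
    rw [ih y z (g y), List.getLast_cons_cons]

-- === B-side characterisation ===

def pvDist (w1 w2 : Int × Int) : Int :=
  ((w2.1 - w1.1).natAbs : Int) + ((w2.2 - w1.2).natAbs : Int)

def pvTailScan (s : Int) (w : Int × Int) : List (Int × Int) → List Int
  | [] => []
  | w2 :: rest => (s + pvDist w w2) :: pvTailScan (s + pvDist w w2) w2 rest

def pvTotal (w : Int × Int) : List (Int × Int) → Int
  | [] => 0
  | w2 :: rest => pvDist w w2 + pvTotal w2 rest

def pvChain (w : Int × Int) : List (Int × Int) → List (Int × Int)
  | [] => []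
  | w2 :: rest => pvCells w w2 ++ pvChain w2 rest

def pvLastW (w : Int × Int) : List (Int × Int) → Int × Int
  | [] => w
  | w2 :: rest => pvLastW w2 rest

def pvMkSegs (s : Int) (w : Int × Int) : List (Int × Int) → List ((Int × Int × Int) × (Int × Int × Int))
  | [] => []
  | w2 :: rest => ((s, w), (s + pvDist w w2, w2)) :: pvMkSegs (s + pvDist w w2) w2 rest

theorem pvDist_nonneg (w1 w2 : Int × Int) : 0 ≤ pvDist w1 w2 := by
  unfold pvDist; positivity

theorem pvTotal_nonneg (w : Int × Int) (rest : List (Int × Int)) : 0 ≤ pvTotal w rest := by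
  induction rest generalizing w with
  | nil => simp [pvTotal]
  | cons w2 r ih => have := pvDist_nonneg w w2; have := ih w2; simp [pvTotal]; omega

theorem pvCells_length (w1 w2 : Int × Int) : ((pvCells w1 w2).length : Int) = pvDist w1 w2 := by
  simp [pvCells, pvDist, pvRowCells_length, pvColCells_length]

theorem pvChain_length (w : Int × Int) (rest : List (Int × Int)) :
    ((pvChain w rest).length : Int) = pvTotal w rest := by
  induction rest generalizing w with
  | nil => simp [pvChain, pvTotal]
  | cons w2 r ih => simp [pvChain, pvTotal, ← ih w2, ← pvCells_length w w2]

theorem pvStartsFold (rest : List (Int × Int)) :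
    ∀ (w : Int × Int) (acc : List Int) (s : Int), PySem.List.pyGetD acc (-1) 0 = s →
      ((w :: rest).zip rest).foldl
        (fun acc p => acc ++ [PySem.List.pyGetD acc (-1) 0
          + ((p.2.1 - p.1.1).natAbs : Int) + ((p.2.2 - p.1.2).natAbs : Int)]) acc
      = acc ++ pvTailScan s w rest := by
  induction rest with
  | nil => intro w acc s _; simp [pvTailScan]
  | cons w2 r ih =>
    intro w acc s hs
    rw [List.zip_cons_cons, List.foldl_cons, hs]
    rw [ih w2 (acc ++ [s + ((w2.1 - w.1).natAbs : Int) + ((w2.2 - w.2).natAbs : Int)])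
        (s + pvDist w w2) (by rw [PySem.List.pyGetD_neg_one_append_singleton]; unfold pvDist; ring)]
    simp [pvTailScan, pvDist]; ring_nf

theorem pvTailLast (rest : List (Int × Int)) :
    ∀ (w : Int × Int) (s : Int),
      PySem.List.pyGetD (s :: pvTailScan s w rest) (-1) 0 = s + pvTotal w rest := by
  induction rest with
  | nil => intro w s; simp [pvTailScan, pvTotal, PySem.List.pyGetD_neg_one]
  | cons w2 r ih =>
    intro w s
    show PySem.List.pyGetD (s :: (s + pvDist w w2) :: pvTailScan (s + pvDist w w2) w2 r) (-1) 0 = _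
    rw [PySem.List.pyGetD_neg_one _ 0 (by simp), List.getLast_cons_cons,
        ← PySem.List.pyGetD_neg_one ((s + pvDist w w2) :: pvTailScan (s + pvDist w w2) w2 r) 0 (by simp),
        ih w2 (s + pvDist w w2)]
    simp [pvTotal]; ring

theorem pvSegsZip (rest : List (Int × Int)) :
    ∀ (w : Int × Int) (s : Int),
      ((s :: pvTailScan s w rest).zip (w :: rest)).zip ((pvTailScan s w rest).zip rest)
        = pvMkSegs s w rest := by
  induction rest with
  | nil => intro w s; simp [pvTailScan, pvMkSegs]
  | cons w2 r ih =>
    intro w s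
    have h := ih w2 (s + pvDist w w2)
    simp only [pvTailScan, pvMkSegs, List.zip_cons_cons] at h ⊢
    rw [h]

theorem pvRowCells_getD : ∀ (k : Nat) (r1 r2 c1 : Int), (k : Int) < ((r2 - r1).natAbs : Int) →
    (pvRowCells r1 r2 c1).getD k (0, 0) = (r1 + (if r1 < r2 then 1 else -1) * k, c1) := by
  intro k
  induction k with
  | zero =>
    intro r1 r2 c1 h
    by_cases hlt : r1 < r2
    · rw [pvRowCells_cons_up c1 hlt]; simp [hlt]
    · rw [pvRowCells_cons_down c1 (by omega)]; simp [hlt]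
  | succ k ih =>
    intro r1 r2 c1 h
    by_cases hlt : r1 < r2
    · rw [pvRowCells_cons_up c1 hlt, List.getD_cons_succ, ih (r1 + 1) r2 c1 (by omega)]
      have : r1 + 1 < r2 := by omega
      simp [hlt, this]; ring
    · rw [pvRowCells_cons_down c1 (by omega), List.getD_cons_succ, ih (r1 - 1) r2 c1 (by omega)]
      have h1 : ¬ r1 - 1 < r2 := by omega
      simp [hlt, h1]; ring

theorem pvColCells_getD : ∀ (k : Nat) (c1 c2 r : Int), (k : Int) < ((c2 - c1).natAbs : Int) →
    (pvColCells c1 c2 r).getD k (0, 0) = (r, c1 + (if c1 < c2 then 1 else -1) * k) := by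
  intro k
  induction k with
  | zero =>
    intro c1 c2 r h
    by_cases hlt : c1 < c2
    · rw [pvColCells_cons_up r hlt]; simp [hlt]
    · rw [pvColCells_cons_down r (by omega)]; simp [hlt]
  | succ k ih =>
    intro c1 c2 r h
    by_cases hlt : c1 < c2
    · rw [pvColCells_cons_up r hlt, List.getD_cons_succ, ih (c1 + 1) c2 r (by omega)]
      have : c1 + 1 < c2 := by omega
      simp [hlt, this]; ring
    · rw [pvColCells_cons_down r (by omega), List.getD_cons_succ, ih (c1 - 1) c2 r (by omega)]
      have h1 : ¬ c1 - 1 < c2 := by omega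
      simp [hlt, h1]; ring

theorem pvCells_getD (w1 w2 : Int × Int) (t : Int) (h0 : 0 ≤ t) (h : t < pvDist w1 w2) :
    (pvCells w1 w2).getD t.toNat (0, 0)
      = (if t < ((w2.1 - w1.1).natAbs : Int) then
          (w1.1 + (if w1.1 < w2.1 then 1 else -1) * t, w1.2)
        else
          (w2.1, w1.2 + (if w1.2 < w2.2 then 1 else -1) * (t - ((w2.1 - w1.1).natAbs : Int)))) := by
  unfold pvCells
  by_cases hdr : t < ((w2.1 - w1.1).natAbs : Int)
  · rw [if_pos hdr, List.getD_append _ _ _ _ (by rw [pvRowCells_length]; omega),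
        pvRowCells_getD t.toNat w1.1 w2.1 w1.2 (by omega), Int.toNat_of_nonneg h0]
  · rw [if_neg hdr, List.getD_append_right _ _ _ _ (by rw [pvRowCells_length]; omega),
        pvRowCells_length]
    have h2 : t - ((w2.1 - w1.1).natAbs : Int) < ((w2.2 - w1.2).natAbs : Int) := by
      unfold pvDist at h; omega
    rw [show t.toNat - (w2.1 - w1.1).natAbs = (t - ((w2.1 - w1.1).natAbs : Int)).toNat by omega,
        pvColCells_getD _ w1.2 w2.2 w2.1 (by omega), Int.toNat_of_nonneg (by omega)]

theorem pvPos_spec (rest : List (Int × Int)) :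
    ∀ (w : Int × Int) (s t : Int), 0 ≤ t → t ≤ pvTotal w rest →
      pvPos (pvMkSegs s w rest) (pvLastW w rest) (s + t)
        = (pvChain w rest ++ [pvLastW w rest]).getD t.toNat (0, 0) := by
  induction rest with
  | nil =>
    intro w s t h0 h1
    have : t = 0 := by simp [pvTotal] at h1; omega
    subst this
    simp [pvMkSegs, pvPos, pvChain, pvLastW]
  | cons w2 r ih =>
    intro w s t h0 h1
    have hd := pvDist_nonneg w w2
    show pvPos (((s, w.1, w.2), (s + pvDist w w2, w2.1, w2.2)) :: pvMkSegs (s + pvDist w w2) w2 r)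
        (pvLastW w2 r) (s + t) = (pvCells w w2 ++ pvChain w2 r ++ [pvLastW w2 r]).getD t.toNat (0, 0)
    rw [pvPos]
    by_cases hlt : s + t < s + pvDist w w2
    · rw [if_pos hlt]
      have hcl := pvCells_length w w2
      rw [List.append_assoc, List.getD_append (pvCells w w2) (pvChain w2 r ++ [pvLastW w2 r])
        (0, 0) t.toNat (by omega)]
      rw [pvCells_getD w w2 t h0 (by omega)]
      simp only [show s + t - s = t by ring]
    · rw [if_neg hlt]
      have ht : pvDist w w2 ≤ t := by omega
      have hTot : pvTotal w (w2 :: r) = pvDist w w2 + pvTotal w2 r := rfl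
      have := pvChain_length w2 r
      have h2 : t - pvDist w w2 ≤ pvTotal w2 r := by omega
      have hrec := ih w2 (s + pvDist w w2) (t - pvDist w w2) (by omega) h2
      rw [show s + t = (s + pvDist w w2) + (t - pvDist w w2) by ring, hrec]
      have hcl := pvCells_length w w2
      rw [List.append_assoc, List.getD_append_right (pvCells w w2) (pvChain w2 r ++ [pvLastW w2 r])
        (0, 0) t.toNat (by omega)]
      congr 1
      omega

theorem pvChainRoute (g : Int → Int × Int) :
    ∀ (l : List Int) (a : Int),
      ((a :: l).zip l).flatMap (fun p => pvCells (g p.1) (g p.2)) = pvChain (g a) (l.map g) := by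
  intro l
  induction l with
  | nil => intro a; simp [pvChain]
  | cons b l' ih => intro a; simp [pvChain, ← ih b]

theorem pvLastW_map (g : Int → Int × Int) :
    ∀ (l : List Int) (a : Int),
      pvLastW (g a) (l.map g) = g ((a :: l).getLast (by simp)) := by
  intro l
  induction l with
  | nil => intro a; simp [pvLastW]
  | cons b l' ih => intro a; rw [List.map_cons]; show pvLastW (g b) _ = _
                    rw [ih b, List.getLast_cons_cons]

theorem pvMapStamp : ∀ (l : List (Int × Int)) (c : Int) (F : Int → Int × Int),
    (∀ k : Nat, k < l.length → F (c + (k : Int)) = l.getD k (0, 0)) →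
    (List.range l.length).map (fun (k : Nat) => ((F (c + (k : Int))).1, (F (c + (k : Int))).2, c + (k : Int))) = pvStamp c l := by
  intro l
  induction l with
  | nil => intro c F _; simp [pvStamp]
  | cons p t ih =>
    intro c F hF
    rw [List.length_cons, List.range_succ_eq_map, List.map_cons, List.map_map]
    have h0 : F (c + ((0 : Nat) : Int)) = p := by
      have := hF 0 (by simp); simpa using this
    rw [show (fun (k : Nat) => ((F (c + (k : Int))).1, (F (c + (k : Int))).2, c + (k : Int))) ∘ Nat.succ
        = (fun (k : Nat) => ((F ((c + 1) + (k : Int))).1, (F ((c + 1) + (k : Int))).2, (c + 1) + (k : Int))) by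
      funext k
      simp only [Function.comp]
      have : c + ((k.succ : Nat) : Int) = (c + 1) + (k : Int) := by push_cast; ring
      rw [this]]
    rw [ih (c + 1) F (by
      intro k hk
      have := hF (k + 1) (by simpa using Nat.succ_lt_succ hk)
      rw [show (c + 1) + (k : Int) = c + ((k + 1 : Nat) : Int) by push_cast; ring, this]
      simp [List.getD])]
    rw [h0]
    simp [pvStamp]

-- pvLastW is List.getLast
theorem pvLastW_getLast (rest : List (Int × Int)) :
    ∀ (w : Int × Int), pvLastW w rest = (w :: rest).getLast (by simp) := by
  induction rest with
  | nil => intro w; simp [pvLastW]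
  | cons w2 r ih => intro w; show pvLastW w2 r = _; rw [ih w2, List.getLast_cons_cons]

-- B's output is the stamped coordinate chain
theorem pvB_char (points : List (Int × Int)) (x y : Int) (t : List Int) :
    move_points_alt points (x :: y :: t)
      = pvStamp 0 (pvChain (PySem.List.pyGetD points (x - 1) (0, 0))
            (((y :: t).map (fun r => PySem.List.pyGetD points (r - 1) (0, 0))))
          ++ [pvLastW (PySem.List.pyGetD points (x - 1) (0, 0))
            ((y :: t).map (fun r => PySem.List.pyGetD points (r - 1) (0, 0)))]) := by
  set g : Int → Int × Int := fun r => PySem.List.pyGetD points (r - 1) (0, 0) with hg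
  set w : Int × Int := g x
  set rest : List (Int × Int) := (y :: t).map g with hrest
  set L : Int × Int := pvLastW w rest with hL
  set l : List (Int × Int) := pvChain w rest ++ [L] with hl
  have hTotNN : 0 ≤ pvTotal w rest := pvTotal_nonneg w rest
  have hChainLen := pvChain_length w rest
  unfold move_points_alt
  have hws : (x :: y :: t).map g = w :: rest := rfl
  simp only [← hg, hws]
  have hstarts : ((w :: rest).zip (w :: rest).tail).foldl
      (fun acc p => acc ++ [PySem.List.pyGetD acc (-1) 0
        + ((p.2.1 - p.1.1).natAbs : Int) + ((p.2.2 - p.1.2).natAbs : Int)]) [0]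
      = 0 :: pvTailScan 0 w rest := by
    rw [show (w :: rest).tail = rest from rfl]
    exact pvStartsFold rest w [0] 0 (by rw [PySem.List.pyGetD_neg_one [0] 0 (by simp)]; rfl)
  rw [hstarts, pvTailLast rest w 0, zero_add]
  simp only [List.tail_cons]
  rw [pvSegsZip rest w 0]
  rw [PySem.List.pyGetD_neg_one (w :: rest) (0, 0) (by simp), ← pvLastW_getLast rest w, ← hL]
  have hlen : pvTotal w rest + 1 = ((l.length : Nat) : Int) := by
    simp [hl]; omega
  rw [hlen, PySem.List.pyRange_zero_natCast, List.map_map]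
  have hcong : ∀ k ∈ List.range l.length,
      ((fun t => ((pvPos (pvMkSegs 0 w rest) L t).1, (pvPos (pvMkSegs 0 w rest) L t).2, t))
          ∘ (fun (k : Nat) => (k : Int))) k
        = (fun (k : Nat) => ((pvPos (pvMkSegs 0 w rest) L (0 + (k : Int))).1,
            (pvPos (pvMkSegs 0 w rest) L (0 + (k : Int))).2, (0 : Int) + (k : Int))) k := by
    intro k _
    simp [Function.comp]
  rw [List.map_congr_left hcong]
  rw [pvMapStamp l 0 (pvPos (pvMkSegs 0 w rest) L) (by
    intro k hk
    have hk' : (k : Int) ≤ pvTotal w rest := by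
      simp [hl] at hk; omega
    have := pvPos_spec rest w 0 (k : Int) (by positivity) hk'
    rw [hL, this, Int.toNat_natCast])]

theorem pv_main (points : List (Int × Int)) (route : List Int) (h2 : 2 ≤ route.length) :
    move_points points route = move_points_alt points route := by
  match route, h2 with
  | x :: y :: t, _ =>
  rw [pvB_char points x y t]
  unfold move_points
  rw [show (pvStepA points (x :: y :: t))
      = (fun st i => pvF points st (PySem.List.pyGetD (x :: y :: t) i 0)
          (PySem.List.pyGetD (x :: y :: t) (i + 1) 0)) from rfl]
  rw [pvIdxFold (pvF points) 0 (x :: y :: t)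
      (([] : List (Int × Int × Int)), (0 : Int), ((0 : Int), (0 : Int)))]
  rw [show (x :: y :: t).tail = y :: t from rfl]
  rw [pvFoldPairs points ((x :: y :: t).zip (y :: t)) [] 0 (0, 0)]
  rw [show (fun (_ : Int × Int) (p : Int × Int) =>
        PySem.List.pyGetD points (p.2 - 1) (0, 0))
      = (fun (_ : Int × Int) (p : Int × Int) =>
          (fun b => PySem.List.pyGetD points (b - 1) (0, 0)) p.2) from rfl]
  rw [pvZipFoldLastSnd (fun b => PySem.List.pyGetD points (b - 1) (0, 0)) t x y]
  rw [pvChainRoute (fun r => PySem.List.pyGetD points (r - 1) (0, 0)) (y :: t) x]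
  rw [pvLastW_map (fun r => PySem.List.pyGetD points (r - 1) (0, 0)) (y :: t) x,
      List.getLast_cons_cons]
  rw [pvStamp_append]
  simp [pvStamp]

-- ===== VERDICT (by name: the statement is the Claim_ definition above) =====
theorem move_points_spec : Claim_equal_move_points := by
  intro points route _ hPre
  exact pv_main points route hPre.1
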